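-- pv_equiv track=rewrite | github.com/julminen/aoc-2018 | src/day_02.py | part_1
-- ===== SOURCE A (Python) =====
-- from typing import List, Dict
--
-- def count_letters(word: str) -> Dict[str, int]:
--     return {k: word.count(k) for k in [c for c in word]}
--
-- def part_1(boxes: List[str]) -> int:
--     twos: int = 0
--     threes: int = 0
--     for box in boxes:
--         counts = count_letters(box)
--         twos += 1 if 2 in counts.values() else 0
--         threes += 1 if 3 in counts.values() else 0
--     return twos * threes
-- ===== SOURCE B (Python) =====
-- def run_lengths(s):
--     lengths = []
--     i = 0
--     n = len(s)
--     while i < n: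
--         j = i
--         while j < n and s[j] == s[i]:
--             j += 1
--         lengths.append(j - i)
--         i = j
--     return lengths
--
-- def part_1(boxes):
--     twos = 0
--     threes = 0
--     for box in boxes:
--         lengths = run_lengths(sorted(box))
--         twos += 1 if 2 in lengths else 0
--         threes += 1 if 3 in lengths else 0
--     return twos * threes
-- ===== Notes on version B (the rewrite author's own statement) =====
-- stated objective: faster
-- what changed: Per box, B sorts the characters and scans consecutive run lengths instead of building a letter-to-count dictionary by calling word.count for every character.
import Mathlib
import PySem

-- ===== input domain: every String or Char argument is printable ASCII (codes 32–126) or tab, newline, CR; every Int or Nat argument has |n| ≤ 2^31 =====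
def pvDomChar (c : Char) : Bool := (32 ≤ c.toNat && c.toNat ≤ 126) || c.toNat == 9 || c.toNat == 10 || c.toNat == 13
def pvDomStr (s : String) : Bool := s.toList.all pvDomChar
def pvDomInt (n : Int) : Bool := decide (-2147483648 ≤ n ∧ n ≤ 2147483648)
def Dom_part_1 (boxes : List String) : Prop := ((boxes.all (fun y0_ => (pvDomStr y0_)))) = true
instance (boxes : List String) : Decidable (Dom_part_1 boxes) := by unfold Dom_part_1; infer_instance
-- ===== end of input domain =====

-- B replaces A's letter→count dictionary (word.count per character) with a sort-then-scan-runs pass per box.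

-- ===== PORT A =====
-- {k: word.count(k) for k in [c for c in word]}  (word.count(k) on a 1-char k = PySem.Chars.count word.toList [k], exact)
def count_letters (word : String) : PySem.Dict Char Int :=
  List.foldl (fun d c => d.insert c ((PySem.Chars.count word.toList [c] : Nat) : Int))
    (PySem.Dict.mk []) word.toList

def part_1 (boxes : List String) : Int :=
  let r := boxes.foldl (fun (st : Int × Int) box =>
    let counts := count_letters box
    let twos := st.1 + (if (2 : Int) ∈ counts.values then 1 else 0)
    let threes := st.2 + (if (3 : Int) ∈ counts.values then 1 else 0)
    (twos, threes)) (0, 0)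
  r.1 * r.2

-- ===== PORT B =====
-- the inner 'while j < n and s[j] == s[i]' run scan: takeWhile is the run, dropWhile the rest
def run_lengths (s : List Char) : List Nat :=
  match s with
  | [] => []
  | c :: t => (1 + (t.takeWhile (· == c)).length) :: run_lengths (t.dropWhile (· == c))
  termination_by s.length
  decreasing_by simp [List.length_cons]; exact List.length_dropWhile_le _ _

def part_1_alt (boxes : List String) : Int :=
  let r := boxes.foldl (fun (st : Int × Int) box =>
    let lengths := run_lengths (PySem.List.sorted box.toList id)
    (st.1 + (if 2 ∈ lengths then 1 else 0), st.2 + (if 3 ∈ lengths then 1 else 0))) (0, 0)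
  r.1 * r.2

-- ===== PRECONDITION & SPEC =====
def Spec_part_1 (boxes : List String) (out : Int) : Prop := out = part_1_alt boxes
instance (boxes : List String) (out : Int) : Decidable (Spec_part_1 boxes out) := by unfold Spec_part_1; infer_instance

-- ===== CLAIM (what is proved, stated in full; the proofs are below) =====
def Claim_equal_part_1 : Prop := ∀ (boxes : List String), Dom_part_1 boxes → Spec_part_1 boxes (part_1 boxes)

-- ===== LEMMAS AND PROOFS =====

theorem countGo_single (c : Char) : ∀ (fuel : Nat) (l : List Char) (acc : Nat),
    l.length ≤ fuel → PySem.Chars.count.go [c] fuel l acc = acc + l.count c := by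
  intro fuel
  induction fuel with
  | zero =>
    intro l acc h
    have : l = [] := List.length_eq_zero_iff.mp (Nat.le_zero.mp h)
    subst this; simp [PySem.Chars.count.go]
  | succ n ih =>
    intro l acc h
    cases l with
    | nil => simp [PySem.Chars.count.go]
    | cons a t =>
      simp only [PySem.Chars.count.go]
      by_cases hc : c = a
      · subst hc
        simp [List.isPrefixOf]
        rw [ih t (acc+1) (by simpa using h)]
        omega
      · have : ([c].isPrefixOf (a :: t)) = false := by
          simp [List.isPrefixOf]; exact fun hh => absurd hh hc
        simp [this, Ne.symm hc, ih t acc (by simpa using h)]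
theorem chars_count_single (cs : List Char) (c : Char) :
    PySem.Chars.count cs [c] = cs.count c := by
  simp only [PySem.Chars.count, List.isEmpty_cons, Bool.false_eq_true, ↓reduceIte]
  simpa using countGo_single c cs.length cs 0 le_rfl


theorem foldl_insert_values (f : Char → Int) : ∀ (cs : List Char) (d : PySem.Dict Char Int),
    (∀ p ∈ d.items, p.2 = f p.1) →
    ∀ v : Int, (v ∈ (cs.foldl (fun d c => d.insert c (f c)) d).values ↔
      v ∈ d.values ∨ ∃ c ∈ cs, f c = v) := by
  intro cs
  induction cs with
  | nil => intro d hd v; simp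
  | cons c cs ih =>
    intro d hd v
    simp only [List.foldl_cons]
    have hstep : ∀ p ∈ (d.insert c (f c)).items, p.2 = f p.1 := by
      intro p hp
      by_cases hcont : d.contains c = true
      · simp only [PySem.Dict.insert, hcont, if_pos] at hp
        obtain ⟨q, hq, hpq⟩ := List.mem_map.mp hp
        by_cases hqc : (q.1 == c) = true
        · simp [hqc] at hpq; subst hpq; rfl
        · simp [hqc] at hpq; subst hpq; exact hd q hq
      · simp only [PySem.Dict.insert, hcont, if_neg, Bool.false_eq_true, not_false_iff] at hp
        rcases List.mem_append.mp hp with h | h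
        · exact hd p h
        · simp at h; subst h; rfl
    have hvals : (d.insert c (f c)).values = d.values ∨
        (d.insert c (f c)).values = d.values ++ [f c] := by
      by_cases hcont : d.contains c = true
      · left
        simp only [PySem.Dict.insert, hcont, if_pos, PySem.Dict.values, List.map_map]
        apply List.map_congr_left
        intro p hp
        by_cases hqc : (p.1 == c) = true
        · simp [hd p hp, eq_of_beq hqc]
        · simp [beq_iff_eq] at hqc; simp [hqc]
      · right
        simp [PySem.Dict.insert, hcont, PySem.Dict.values]
    have hcmem : d.contains c = true → f c ∈ d.values := by
      intro hcont
      obtain ⟨p, hp, hbeq⟩ := List.any_eq_true.mp hcont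
      have : p.1 = c := eq_of_beq hbeq
      exact List.mem_map.mpr ⟨p, hp, by rw [hd p hp, this]⟩
    rw [ih _ hstep v]
    rcases hvals with h | h
    · rw [h]
      have hcont : d.contains c = true := by
        by_contra hc
        have := congrArg List.length h
        simp [PySem.Dict.insert, hc, PySem.Dict.values] at this
      constructor
      · rintro (hv | hv)
        · exact Or.inl hv
        · rcases hv with ⟨c', hc', hfc⟩; exact Or.inr ⟨c', List.mem_cons_of_mem _ hc', hfc⟩
      · rintro (hv | hv)
        · exact Or.inl hv
        · rcases hv with ⟨c', hc', hfc⟩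
          rcases List.mem_cons.mp hc' with rfl | hc'
          · exact Or.inl (hfc ▸ hcmem hcont)
          · exact Or.inr ⟨c', hc', hfc⟩
    · rw [h]
      simp only [List.mem_append, List.mem_singleton]
      constructor
      · rintro (⟨hv | hv⟩ | hv)
        · exact Or.inl hv
        · exact Or.inr ⟨c, by simp, hv.symm⟩
        · rcases hv with ⟨c', hc', hfc⟩; exact Or.inr ⟨c', by simp [hc'], hfc⟩
      · rintro (hv | ⟨c', hc', hfc⟩)
        · exact Or.inl (Or.inl hv)
        · rcases List.mem_cons.mp hc' with rfl | hc'
          · exact Or.inl (Or.inr hfc.symm)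
          · exact Or.inr ⟨c', hc', hfc⟩

theorem mem_run_lengths_iff : ∀ (l : List Char), l.Pairwise (· ≤ ·) →
    ∀ k : Nat, (k ∈ run_lengths l ↔ ∃ c ∈ l, l.count c = k) := by
  intro l
  induction l using run_lengths.induct with
  | case1 => intro _ k; simp [run_lengths]
  | case2 c t ih =>
    intro hp k
    have hpt : t.Pairwise (· ≤ ·) := hp.tail
    have hct : ∀ x ∈ t, c ≤ x := fun x hx => (List.pairwise_cons.mp hp).1 x hx
    set t1 := t.takeWhile (· == c) with ht1
    set t2 := t.dropWhile (· == c) with ht2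
    have hsplit : t1 ++ t2 = t := List.takeWhile_append_dropWhile
    have ht1c : ∀ x ∈ t1, x = c := by
      intro x hx
      have := List.mem_takeWhile_imp hx
      simpa [beq_iff_eq] using this
    have hpt2 : t2.Pairwise (· ≤ ·) := hpt.sublist (List.dropWhile_sublist _)
    have ht2c : ∀ x ∈ t2, c < x := by
      intro x hx
      cases h2 : t2 with
      | nil => simp [h2] at hx
      | cons h rest =>
        have hh : ¬ (h == c) = true := by
          have := List.head_dropWhile_not (· == c) (l := t) (by rw [← ht2, h2]; simp)
          simpa [← ht2, h2] using this
        have hhc : c < h := lt_of_le_of_ne (hct h (by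
            have : h ∈ t2 := by simp [h2]
            exact (hsplit ▸ List.mem_append.mpr (Or.inr this))))
          (by simp [beq_iff_eq] at hh; exact fun e => hh e.symm)
        rw [h2] at hx
        rcases List.mem_cons.mp hx with rfl | hx
        · exact hhc
        · have : h ≤ x := ((List.pairwise_cons.mp (h2 ▸ hpt2)).1) x hx
          exact lt_of_lt_of_le hhc this
    have hcl : (c :: t).count c = 1 + t1.length := by
      rw [← hsplit, List.count_cons_self, List.count_append]
      have h1 : t1.count c = t1.length := List.count_eq_length.mpr (fun x hx => (ht1c x hx) ▸ rfl)
      have h2 : t2.count c = 0 := List.count_eq_zero.mpr (fun hx => lt_irrefl c (ht2c c hx))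
      omega
    have hd2 : ∀ d ∈ t2, (c :: t).count d = t2.count d := by
      intro d hd
      have hdc : c < d := ht2c d hd
      rw [← hsplit, List.count_cons, List.count_append]
      have h1 : t1.count d = 0 := List.count_eq_zero.mpr (fun hx => absurd (ht1c d hx) (ne_of_gt hdc))
      simp [h1, (ne_of_gt hdc).symm]
    rw [run_lengths, ← ht1, ← ht2]
    rw [show (k ∈ (1 + t1.length) :: run_lengths t2) ↔ (k = 1 + t1.length ∨ k ∈ run_lengths t2) from List.mem_cons]
    rw [ih hpt2 k]
    constructor
    · rintro (rfl | ⟨d, hd, hcnt⟩)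
      · exact ⟨c, List.mem_cons_self, hcl⟩
      · refine ⟨d, ?_, by rw [hd2 d hd]; exact hcnt⟩
        exact List.mem_cons_of_mem _ (hsplit ▸ List.mem_append.mpr (Or.inr hd))
    · rintro ⟨d, hd, hcnt⟩
      rcases List.mem_cons.mp hd with rfl | hd
      · left; omega
      · rcases List.mem_append.mp (hsplit ▸ hd) with h1 | h2
        · left; rw [← hcnt, ht1c d h1]; omega
        · right; exact ⟨d, h2, by rw [← hd2 d h2]; exact hcnt⟩

theorem mem_values_count_letters (word : String) (v : Int) :
    (v ∈ (count_letters word).values) ↔ ∃ c ∈ word.toList, (word.toList.count c : Int) = v := by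
  unfold count_letters
  simp only [chars_count_single]
  rw [foldl_insert_values (fun c => ((word.toList.count c : Nat) : Int)) word.toList
       (PySem.Dict.mk []) (by intro p hp; simp at hp) v]
  simp [PySem.Dict.values]

theorem box_cond_eq (box : String) (k : Nat) :
    ((k : Int) ∈ (count_letters box).values) = (k ∈ run_lengths (PySem.List.sorted box.toList id)) := by
  apply propext
  rw [mem_values_count_letters]
  have hperm : (PySem.List.sorted box.toList id).Perm box.toList :=
    PySem.List.sorted_perm box.toList id false
  have hpw : (PySem.List.sorted box.toList id).Pairwise (· ≤ ·) := by
    simpa using PySem.List.sorted_pairwise box.toList id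
  rw [mem_run_lengths_iff _ hpw k]
  constructor
  · rintro ⟨c, hc, hcnt⟩
    exact ⟨c, hperm.mem_iff.mpr hc, by rw [hperm.count_eq]; exact_mod_cast hcnt⟩
  · rintro ⟨c, hc, hcnt⟩
    exact ⟨c, hperm.mem_iff.mp hc, by rw [← hperm.count_eq]; exact_mod_cast hcnt⟩

theorem fold_eq (boxes : List String) : ∀ (st : Int × Int),
    boxes.foldl (fun (st : Int × Int) box =>
      let counts := count_letters box
      let twos := st.1 + (if (2 : Int) ∈ counts.values then 1 else 0)
      let threes := st.2 + (if (3 : Int) ∈ counts.values then 1 else 0)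
      (twos, threes)) st
    = boxes.foldl (fun (st : Int × Int) box =>
      let lengths := run_lengths (PySem.List.sorted box.toList id)
      (st.1 + (if 2 ∈ lengths then 1 else 0), st.2 + (if 3 ∈ lengths then 1 else 0))) st := by
  induction boxes with
  | nil => intro st; rfl
  | cons box boxes ih =>
    intro st
    simp only [List.foldl_cons]
    have h2 := box_cond_eq box 2
    have h3 := box_cond_eq box 3
    simp only [Nat.cast_ofNat] at h2 h3
    rw [ih]
    congr 1
    simp only [h2, h3]

-- ===== VERDICT (by name: the statement is the Claim_ definition above) =====
theorem part_1_spec : Claim_equal_part_1 := by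
  intro boxes _
  unfold Spec_part_1 part_1 part_1_alt
  rw [fold_eq boxes (0, 0)]
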